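-- pv_equiv track=rewrite | github.com/hideki-okada/atcoder | ABC/009/C_jishoshiki_junjo_futatabi.py | cal_huicchi
-- ===== SOURCE A (Python) =====
-- from collections import Counter
--
-- def cal_huicchi(s: str, t: str):
--     count_s = Counter(s)
--     count_t = Counter(t)
--     alphabet_list = [chr(ord("a") + i) for i in range(26)]
--     icchi = 0
--     for c in alphabet_list:
--         icchi += min(count_s[c], count_t[c])
--     return len(s) - icchi
-- ===== SOURCE B (Python) =====
-- def cal_huicchi(s: str, t: str):
--     xs = sorted(c for c in s if 'a' <= c <= 'z')
--     ys = sorted(c for c in t if 'a' <= c <= 'z')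
--     i = j = matched = 0
--     while i < len(xs) and j < len(ys):
--         if xs[i] == ys[j]:
--             matched += 1
--             i += 1
--             j += 1
--         elif xs[i] < ys[j]:
--             i += 1
--         else:
--             j += 1
--     return len(s) - matched
-- ===== Notes on version B (the rewrite author's own statement) =====
-- stated objective: alternative
-- what changed: Replaces the 26-letter histogram scan over two Counters by filtering both strings to lowercase letters, sorting them, and counting the multiset intersection with a two-pointer merge, then subtracting from len(s).
import Mathlib
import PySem

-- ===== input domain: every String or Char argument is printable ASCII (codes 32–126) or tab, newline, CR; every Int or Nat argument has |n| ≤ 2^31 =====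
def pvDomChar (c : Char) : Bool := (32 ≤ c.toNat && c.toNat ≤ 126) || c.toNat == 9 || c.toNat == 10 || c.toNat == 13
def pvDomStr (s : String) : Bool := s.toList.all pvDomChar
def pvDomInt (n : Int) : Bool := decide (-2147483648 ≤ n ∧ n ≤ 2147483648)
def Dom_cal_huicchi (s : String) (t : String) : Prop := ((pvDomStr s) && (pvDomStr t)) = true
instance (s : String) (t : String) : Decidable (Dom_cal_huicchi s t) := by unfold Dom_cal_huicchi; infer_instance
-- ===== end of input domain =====

-- B replaces the 26-letter Counter histogram scan by sort-then-merge multiset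
-- intersection counting (alternative algorithm, same return value everywhere).

-- ===== PORT A =====
def cal_huicchi (s : String) (t : String) : Int :=
  let count_s := PySem.Dict.counter s.toList
  let count_t := PySem.Dict.counter t.toList
  let alphabet_list := (PySem.List.pyRange 0 26 1).map (fun i => Char.ofNat ((97 : Int) + i).toNat)
  let icchi := alphabet_list.foldl (fun acc c => acc + min (count_s.getD c 0) (count_t.getD c 0)) 0
  PySem.Str.len s - icchi

-- ===== PORT B =====
def pvIsLower (c : Char) : Bool := decide ('a' ≤ c) && decide (c ≤ 'z')

-- the two-pointer merge loop of Source B, transcribed as recursion on the two sorted lists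
def pvMergeCount : List Char → List Char → Nat
  | [], _ => 0
  | _ :: _, [] => 0
  | a :: as, b :: bs =>
    if a = b then pvMergeCount as bs + 1
    else if a < b then pvMergeCount as (b :: bs)
    else pvMergeCount (a :: as) bs
termination_by xs ys => xs.length + ys.length
decreasing_by all_goals simp <;> omega

def cal_huicchi_alt (s : String) (t : String) : Int :=
  let xs := PySem.List.sorted (s.toList.filter pvIsLower) (fun c => c)
  let ys := PySem.List.sorted (t.toList.filter pvIsLower) (fun c => c)
  PySem.Str.len s - (pvMergeCount xs ys : Int)

-- ===== PRECONDITION & SPEC =====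
def Spec_cal_huicchi (s : String) (t : String) (out : Int) : Prop := out = cal_huicchi_alt s t
instance (s : String) (t : String) (out : Int) : Decidable (Spec_cal_huicchi s t out) := by unfold Spec_cal_huicchi; infer_instance

-- ===== CLAIM (what is proved, stated in full; the proofs are below) =====
def Claim_equal_cal_huicchi : Prop := ∀ (s : String) (t : String), Dom_cal_huicchi s t → Spec_cal_huicchi s t (cal_huicchi s t)

-- ===== LEMMAS AND PROOFS =====
def pvLetters : List Char :=
  ['a','b','c','d','e','f','g','h','i','j','k','l','m','n','o','p','q','r','s','t','u','v','w','x','y','z']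

lemma pvLetters_nodup : pvLetters.Nodup := by decide

lemma pvLower_of_mem_letters : ∀ c ∈ pvLetters, pvIsLower c = true := by
  intro c hc
  fin_cases hc <;> rfl

lemma pvMem_letters_of_lower (c : Char) (h : pvIsLower c = true) : c ∈ pvLetters := by
  have h1 : 97 ≤ c.toNat ∧ c.toNat ≤ 122 := by
    simp only [pvIsLower, Bool.and_eq_true, decide_eq_true_eq] at h
    exact ⟨Fin.mk_le_mk.mp h.1, Fin.mk_le_mk.mp h.2⟩
  obtain ⟨h1, h2⟩ := h1
  have hc : c = Char.ofNat c.toNat := (Char.ofNat_toNat c).symm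
  rw [hc]
  set n := c.toNat with hn
  interval_cases n <;> decide

lemma pvMergeCount_eq_card_inter :
    ∀ (n : Nat) (xs ys : List Char), xs.length + ys.length ≤ n →
    xs.Pairwise (· ≤ ·) → ys.Pairwise (· ≤ ·) →
    pvMergeCount xs ys = Multiset.card ((xs : Multiset Char) ∩ (ys : Multiset Char)) := by
  intro n
  induction n with
  | zero =>
    intro xs ys hlen _ _
    match xs, ys with
    | [], _ => simp [pvMergeCount]
    | _ :: _, _ => simp at hlen
  | succ n ih =>
    intro xs ys hlen hxs hys
    match xs, ys with
    | [], ys => simp [pvMergeCount]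
    | a :: as, [] => simp [pvMergeCount]
    | a :: as, b :: bs =>
      have hxs' := hxs.of_cons
      have hys' := hys.of_cons
      have hlen' : as.length + bs.length + 2 ≤ n + 1 := by simpa [Nat.add_assoc, Nat.add_comm, Nat.add_left_comm] using hlen
      by_cases hab : a = b
      · subst hab
        have hmem : a ∈ ((a :: bs : List Char) : Multiset Char) := by simp
        rw [show pvMergeCount (a :: as) (a :: bs) = pvMergeCount as bs + 1 by
              simp [pvMergeCount]]
        rw [← Multiset.cons_coe, Multiset.cons_inter_of_pos _ hmem]
        simp only [Multiset.coe_erase, List.erase_cons_head,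
          Multiset.card_cons]
        rw [ih as bs (by omega) hxs' hys']
      · by_cases hlt : a < b
        · have hnot : a ∉ ((b :: bs : List Char) : Multiset Char) := by
            simp only [Multiset.mem_coe, List.mem_cons]
            rintro (rfl | hmem)
            · exact hab rfl
            · have := (List.pairwise_cons.mp hys).1 a hmem
              exact absurd hlt (not_lt.mpr this)
          rw [show pvMergeCount (a :: as) (b :: bs) = pvMergeCount as (b :: bs) by
                simp [pvMergeCount, hab, hlt]]
          rw [← Multiset.cons_coe, Multiset.cons_inter_of_neg _ hnot]
          exact ih as (b :: bs) (by simp at hlen ⊢; omega) hxs' hys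
        · have hnot : b ∉ ((a :: as : List Char) : Multiset Char) := by
            simp only [Multiset.mem_coe, List.mem_cons]
            rintro (rfl | hmem)
            · exact hab rfl
            · have hba : ¬ a = b := hab
              have hle : a ≤ b := (List.pairwise_cons.mp hxs).1 b hmem
              rcases lt_or_eq_of_le hle with h | h
              · exact hlt h
              · exact hab h
          rw [show pvMergeCount (a :: as) (b :: bs) = pvMergeCount (a :: as) bs by
                simp [pvMergeCount, hab, hlt]]
          rw [Multiset.inter_comm, ← Multiset.cons_coe, Multiset.cons_inter_of_neg _ hnot,
            Multiset.inter_comm]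
          exact ih (a :: as) bs (by simp at hlen ⊢; omega) hxs hys'

lemma pvCard_inter_eq_sum (fs ft : List Char) (hsub : ∀ c ∈ fs, c ∈ pvLetters) :
    Multiset.card ((fs : Multiset Char) ∩ (ft : Multiset Char)) =
      (pvLetters.map (fun c => min (fs.count c) (ft.count c))).sum := by
  calc Multiset.card ((fs : Multiset Char) ∩ (ft : Multiset Char))
      = ∑ a ∈ ((fs : Multiset Char) ∩ ft).toFinset,
          Multiset.count a ((fs : Multiset Char) ∩ ft) :=
        (Multiset.toFinset_sum_count_eq _).symm
    _ = ∑ a ∈ pvLetters.toFinset, Multiset.count a ((fs : Multiset Char) ∩ ft) := by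
        apply Finset.sum_subset
        · intro a ha
          simp only [Multiset.toFinset_inter, Finset.mem_inter, Multiset.mem_toFinset,
            Multiset.mem_coe] at ha
          exact List.mem_toFinset.mpr (hsub a ha.1)
        · intro a _ ha
          simp only [Multiset.mem_toFinset] at ha
          exact Multiset.count_eq_zero.mpr ha
    _ = ∑ a ∈ pvLetters.toFinset, min (fs.count a) (ft.count a) := by
        apply Finset.sum_congr rfl
        intro a _
        simp
    _ = (pvLetters.map (fun c => min (fs.count c) (ft.count c))).sum :=
        List.sum_toFinset _ pvLetters_nodup

lemma pvSorted_filter_count (l : List Char) (c : Char) (hc : pvIsLower c = true) :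
    (PySem.List.sorted (l.filter pvIsLower) (fun c => c)).count c = l.count c := by
  rw [(PySem.List.sorted_perm (l.filter pvIsLower) (fun c => c) false).count_eq]
  exact List.count_filter hc

-- ===== VERDICT (by name: the statement is the Claim_ definition above) =====
theorem cal_huicchi_spec : Claim_equal_cal_huicchi := by
  intro s t _
  unfold Spec_cal_huicchi cal_huicchi cal_huicchi_alt
  simp only [PySem.List.foldl_add, zero_add, PySem.Dict.getD_counter]
  congr 1
  set xs := PySem.List.sorted (s.toList.filter pvIsLower) (fun c => c) with hxs
  set ys := PySem.List.sorted (t.toList.filter pvIsLower) (fun c => c) with hys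
  have halpha : (PySem.List.pyRange 0 26 1).map (fun i => Char.ofNat ((97 : Int) + i).toNat)
      = pvLetters := by decide
  have hpx : xs.Pairwise (· ≤ ·) :=
    PySem.List.sorted_pairwise (s.toList.filter pvIsLower) (fun c => c)
  have hpy : ys.Pairwise (· ≤ ·) :=
    PySem.List.sorted_pairwise (t.toList.filter pvIsLower) (fun c => c)
  have hsub : ∀ c ∈ xs, c ∈ pvLetters := by
    intro c hc
    rw [hxs, PySem.List.mem_sorted] at hc
    exact pvMem_letters_of_lower c (List.of_mem_filter hc)
  rw [pvMergeCount_eq_card_inter (xs.length + ys.length) xs ys le_rfl hpx hpy,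
    pvCard_inter_eq_sum xs ys hsub, halpha]
  rw [Nat.cast_list_sum, List.map_map]
  congr 1
  apply List.map_congr_left
  intro c hc
  have hlow := pvLower_of_mem_letters c hc
  simp only [Function.comp_apply, Nat.cast_min]
  rw [hxs, hys, pvSorted_filter_count s.toList c hlow, pvSorted_filter_count t.toList c hlow]
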